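-- pv_equiv track=rewrite | github.com/Johnny1188/Servers_range_finding_code_challenge | reply_challenge_servers.py | addAnotherServerCPUFromSequence
-- ===== SOURCE A (Python) =====
-- def addAnotherServerCPUFromSequence(index_of_server,sum_of_cpu_power,goal_cpu,servers_cpu_array,smallestMarginOfPower,ending_index_of_final_sequence):
--     sum_of_cpu_power += int(servers_cpu_array[index_of_server])
--     # BASE CASE
--     if sum_of_cpu_power >= goal_cpu:
--         if sum_of_cpu_power-goal_cpu <= smallestMarginOfPower:
--             smallestMarginOfPower = sum_of_cpu_power-goal_cpu
--             return([index_of_server,ending_index_of_final_sequence, smallestMarginOfPower])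
--         else:
--             return([])
--     elif index_of_server-1 < 0:
--         return([])
--     return(addAnotherServerCPUFromSequence(index_of_server-1,sum_of_cpu_power,goal_cpu,servers_cpu_array,smallestMarginOfPower,ending_index_of_final_sequence))
-- ===== SOURCE B (Python) =====
-- def addAnotherServerCPUFromSequence(index_of_server, sum_of_cpu_power, goal_cpu, servers_cpu_array, smallestMarginOfPower, ending_index_of_final_sequence):
--     # Phase 1: materialise the running totals seen when scanning down from index_of_server.
--     totals = [sum_of_cpu_power + int(servers_cpu_array[index_of_server])]
--     rest = reversed(servers_cpu_array[:index_of_server]) if index_of_server > 0 else []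
--     for x in rest:
--         totals.append(totals[-1] + int(x))
--     # Phase 2: the first total reaching the goal decides the answer.
--     for k, t in enumerate(totals):
--         if t >= goal_cpu:
--             margin = t - goal_cpu
--             if margin <= smallestMarginOfPower:
--                 return [index_of_server - k, ending_index_of_final_sequence, margin]
--             return []
--     return []
-- ===== Notes on version B (the rewrite author's own statement) =====
-- stated objective: alternative
-- what changed: Replaces A's tail recursion by a two-phase iterative scan: first materialise the list of running totals from index_of_server downward, then return the answer decided by the first total that reaches the goal.
import Mathlib
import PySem

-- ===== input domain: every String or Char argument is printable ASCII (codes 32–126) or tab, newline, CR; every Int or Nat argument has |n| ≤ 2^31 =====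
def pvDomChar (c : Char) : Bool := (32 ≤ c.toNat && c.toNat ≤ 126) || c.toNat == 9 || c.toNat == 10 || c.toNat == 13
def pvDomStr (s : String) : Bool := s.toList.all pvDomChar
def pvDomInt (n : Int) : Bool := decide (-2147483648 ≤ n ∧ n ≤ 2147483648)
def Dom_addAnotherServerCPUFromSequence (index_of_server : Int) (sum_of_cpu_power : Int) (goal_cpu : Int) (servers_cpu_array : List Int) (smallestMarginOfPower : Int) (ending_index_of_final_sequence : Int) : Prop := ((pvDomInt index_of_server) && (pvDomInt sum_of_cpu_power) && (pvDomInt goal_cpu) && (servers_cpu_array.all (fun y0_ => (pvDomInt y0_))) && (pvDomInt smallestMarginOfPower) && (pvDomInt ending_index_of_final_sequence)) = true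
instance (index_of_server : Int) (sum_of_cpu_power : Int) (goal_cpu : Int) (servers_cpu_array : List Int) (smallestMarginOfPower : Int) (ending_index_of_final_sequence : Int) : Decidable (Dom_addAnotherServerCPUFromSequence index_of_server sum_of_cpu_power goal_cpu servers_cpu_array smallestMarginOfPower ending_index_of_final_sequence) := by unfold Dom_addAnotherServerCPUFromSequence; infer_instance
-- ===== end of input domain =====

-- B replaces A's tail recursion by a two-phase scan (materialise all running totals, then pick the
-- first one reaching the goal) — objective: alternative decomposition, same O(n) cost, no recursion.

-- ===== PORT A =====
def addAnotherServerCPUFromSequence (index_of_server : Int) (sum_of_cpu_power : Int) (goal_cpu : Int) (servers_cpu_array : List Int) (smallestMarginOfPower : Int) (ending_index_of_final_sequence : Int) : List Int :=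
  match PySem.List.pyGet? servers_cpu_array index_of_server with
  | none => []  -- unreachable under Pre_ (Python raises IndexError here)
  | some v =>
    let s := sum_of_cpu_power + v
    if s ≥ goal_cpu then
      if s - goal_cpu ≤ smallestMarginOfPower then
        [index_of_server, ending_index_of_final_sequence, s - goal_cpu]
      else []
    else if index_of_server - 1 < 0 then []
    else addAnotherServerCPUFromSequence (index_of_server - 1) s goal_cpu servers_cpu_array smallestMarginOfPower ending_index_of_final_sequence
termination_by index_of_server.toNat
decreasing_by omega

-- ===== PORT B =====
-- phase 1 loop: totals.append(totals[-1] + x)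
def pvCum (t : Int) (xs : List Int) : List Int :=
  match xs with
  | [] => []
  | x :: r => (t + x) :: pvCum (t + x) r

-- phase 2 loop: for k, t in enumerate(totals)
def pvFindHit (i0 e m g : Int) (k : Int) (ts : List Int) : List Int :=
  match ts with
  | [] => []
  | t :: r =>
    if t ≥ g then
      if t - g ≤ m then [i0 - k, e, t - g] else []
    else pvFindHit i0 e m g (k + 1) r

def addAnotherServerCPUFromSequence_alt (index_of_server : Int) (sum_of_cpu_power : Int) (goal_cpu : Int) (servers_cpu_array : List Int) (smallestMarginOfPower : Int) (ending_index_of_final_sequence : Int) : List Int :=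
  match PySem.List.pyGet? servers_cpu_array index_of_server with
  | none => []  -- unreachable under Pre_ (Python raises IndexError here)
  | some v =>
    let t0 := sum_of_cpu_power + v
    let rest :=
      if index_of_server > 0 then
        (PySem.List.slice servers_cpu_array none (some index_of_server)).reverse
      else []
    let totals := t0 :: pvCum t0 rest
    pvFindHit index_of_server ending_index_of_final_sequence smallestMarginOfPower goal_cpu 0 totals

-- ===== PRECONDITION & SPEC =====
-- Pre_ excludes exactly the IndexError of servers_cpu_array[index_of_server]
def Pre_addAnotherServerCPUFromSequence (index_of_server : Int) (sum_of_cpu_power : Int) (goal_cpu : Int) (servers_cpu_array : List Int) (smallestMarginOfPower : Int) (ending_index_of_final_sequence : Int) : Prop :=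
  PySem.Raise.InRange servers_cpu_array.length index_of_server
instance (index_of_server : Int) (sum_of_cpu_power : Int) (goal_cpu : Int) (servers_cpu_array : List Int) (smallestMarginOfPower : Int) (ending_index_of_final_sequence : Int) : Decidable (Pre_addAnotherServerCPUFromSequence index_of_server sum_of_cpu_power goal_cpu servers_cpu_array smallestMarginOfPower ending_index_of_final_sequence) := by unfold Pre_addAnotherServerCPUFromSequence; infer_instance

def pvWitness_addAnotherServerCPUFromSequence : Int × Int × Int × List Int × Int × Int := (2, 0, 10, [3, 4, 5], 3, 2)

def Spec_addAnotherServerCPUFromSequence (index_of_server : Int) (sum_of_cpu_power : Int) (goal_cpu : Int) (servers_cpu_array : List Int) (smallestMarginOfPower : Int) (ending_index_of_final_sequence : Int) (out : List Int) : Prop := out = addAnotherServerCPUFromSequence_alt index_of_server sum_of_cpu_power goal_cpu servers_cpu_array smallestMarginOfPower ending_index_of_final_sequence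
instance (index_of_server : Int) (sum_of_cpu_power : Int) (goal_cpu : Int) (servers_cpu_array : List Int) (smallestMarginOfPower : Int) (ending_index_of_final_sequence : Int) (out : List Int) : Decidable (Spec_addAnotherServerCPUFromSequence index_of_server sum_of_cpu_power goal_cpu servers_cpu_array smallestMarginOfPower ending_index_of_final_sequence out) := by unfold Spec_addAnotherServerCPUFromSequence; infer_instance

-- ===== CLAIM (what is proved, stated in full; the proofs are below) =====
def Claim_equal_addAnotherServerCPUFromSequence : Prop := ∀ (index_of_server : Int) (sum_of_cpu_power : Int) (goal_cpu : Int) (servers_cpu_array : List Int) (smallestMarginOfPower : Int) (ending_index_of_final_sequence : Int), Dom_addAnotherServerCPUFromSequence index_of_server sum_of_cpu_power goal_cpu servers_cpu_array smallestMarginOfPower ending_index_of_final_sequence → Pre_addAnotherServerCPUFromSequence index_of_server sum_of_cpu_power goal_cpu servers_cpu_array smallestMarginOfPower ending_index_of_final_sequence → Spec_addAnotherServerCPUFromSequence index_of_server sum_of_cpu_power goal_cpu servers_cpu_array smallestMarginOfPower ending_index_of_final_sequence (addAnotherServerCPUFromSequence index_of_server sum_of_cpu_power goal_cpu servers_cpu_array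 smallestMarginOfPower ending_index_of_final_sequence)

-- ===== LEMMAS AND PROOFS =====

-- shifting the enumerate counter shifts the reported start index
lemma pvFindHit_shift (i0 e m g k : Int) (ts : List Int) :
    pvFindHit i0 e m g (k + 1) ts = pvFindHit (i0 - 1) e m g k ts := by
  induction ts generalizing k with
  | nil => rfl
  | cons t r ih =>
    simp only [pvFindHit]
    have : i0 - (k + 1) = i0 - 1 - k := by ring
    rw [this, ih]

-- the main invariant: A's descent from index n equals B's scan of the materialised totals
lemma pv_main (goal_cpu m e : Int) (arr : List Int) (n : Nat) (hn : n < arr.length) :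
    ∀ s : Int,
      addAnotherServerCPUFromSequence (n : Int) s goal_cpu arr m e =
        pvFindHit (n : Int) e m goal_cpu 0
          ((s + arr[n]) :: pvCum (s + arr[n]) ((arr.take n).reverse)) := by
  induction n with
  | zero =>
    intro s
    have hget : PySem.List.pyGet? arr ((0 : Nat) : Int) = some arr[0] := by
      rw [PySem.List.pyGet?_natCast]; exact List.getElem?_eq_getElem hn
    rw [addAnotherServerCPUFromSequence, hget]
    dsimp only
    simp only [pvFindHit, pvCum, List.take_zero, List.reverse_nil]
    split_ifs with h1 h2 <;> simp <;> omega
  | succ j ih =>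
    intro s
    have hj : j < arr.length := by omega
    have hget : PySem.List.pyGet? arr ((j + 1 : Nat) : Int) = some arr[j + 1] := by
      rw [PySem.List.pyGet?_natCast]; exact List.getElem?_eq_getElem hn
    rw [addAnotherServerCPUFromSequence, hget]
    dsimp only
    have htake : (arr.take (j + 1)).reverse = arr[j] :: (arr.take j).reverse := by
      rw [List.take_add_one, List.getElem?_eq_getElem hj]
      simp
    have hrec : ((j + 1 : Nat) : Int) - 1 = (j : Int) := by push_cast; ring
    by_cases hge : s + arr[j + 1] ≥ goal_cpu
    · rw [if_pos hge]
      conv_rhs => rw [pvFindHit]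
      rw [if_pos hge]
      split_ifs <;> simp
    · have hpos : ¬ ((j + 1 : Nat) : Int) - 1 < 0 := by push_cast; omega
      rw [if_neg hge, if_neg hpos, hrec, ih hj (s + arr[j + 1]), htake]
      conv_rhs => rw [pvFindHit]
      have hsh := pvFindHit_shift (((j : Int) + 1)) e m goal_cpu 0
      rw [zero_add] at hsh
      push_cast
      rw [if_neg hge, hsh, pvCum]
      norm_num

-- ===== VERDICT (by name: the statement is the Claim_ definition above) =====
theorem addAnotherServerCPUFromSequence_spec : Claim_equal_addAnotherServerCPUFromSequence := by
  intro i s g arr m e _hDom hPre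
  unfold Spec_addAnotherServerCPUFromSequence
  have hir : -(arr.length : Int) ≤ i ∧ i < arr.length := by
    simpa [Pre_addAnotherServerCPUFromSequence, PySem.Raise.InRange] using hPre
  by_cases hneg : i < 0
  · -- single-element case: both sides look only at arr[i]
    obtain ⟨v, hv⟩ : ∃ v, PySem.List.pyGet? arr i = some v := by
      cases hget : PySem.List.pyGet? arr i with
      | none =>
        exfalso
        have := (PySem.List.pyGet?_eq_none_iff (xs := arr) (i := i)).mp hget
        exact this (by simpa [PySem.Raise.InRange] using hir)
      | some v => exact ⟨v, rfl⟩
    rw [addAnotherServerCPUFromSequence]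
    unfold addAnotherServerCPUFromSequence_alt
    rw [hv]
    have hle : ¬ i > 0 := by omega
    have hlt : i - 1 < 0 := by omega
    simp only [hle, if_false, hlt, if_true, pvCum, pvFindHit]
    split_ifs <;> simp
  · -- nonnegative index: the induction lemma
    have h0 : 0 ≤ i := by omega
    obtain ⟨n, rfl⟩ : ∃ n : Nat, i = (n : Int) := ⟨i.toNat, by omega⟩
    have hn : n < arr.length := by exact_mod_cast hir.2
    rw [pv_main g m e arr n hn s]
    unfold addAnotherServerCPUFromSequence_alt
    have hget : PySem.List.pyGet? arr (n : Int) = some arr[n] := by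
      simpa using PySem.List.pyGet?_natCast (xs := arr) (n := n) hn
    rw [hget]
    by_cases hz : (n : Int) > 0
    · have hslice : PySem.List.slice arr none (some (n : Int)) = arr.take n :=
        PySem.List.slice_to_natCast arr n
      simp only [hz, if_true, hslice]
    · have hn0 : n = 0 := by omega
      subst hn0
      simp
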